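-- pv_equiv track=rewrite | github.com/PayneSun/FirstRepository | nlp/TibetanDataProcess/label_ne_feature.py | match_sylls
-- ===== SOURCE A (Python) =====
-- def match_sylls(sent_syll_list, nf_syll_list):
--     """"""
--     nf_len = len(nf_syll_list)
--     sent_len = len(sent_syll_list)
--
--     pos_list = []
--     nf_sylls = ''.join(nf_syll_list)
--     for i in range(sent_len - nf_len):
--         sent_sylls = ''.join(sent_syll_list[i:i+nf_len])
--         if sent_sylls == nf_sylls:
--             for j in range(nf_len):
--                 pos_list.append([i+j, 1])
--
--     return pos_list
-- ===== SOURCE B (Python) =====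
-- def match_sylls(sent_syll_list, nf_syll_list):
--     """Concatenate the sentence once and use precomputed boundary offsets,
--     so each window check is a single slice comparison instead of a join."""
--     nf_len = len(nf_syll_list)
--     sent_len = len(sent_syll_list)
--
--     target = ''.join(nf_syll_list)
--     big = ''.join(sent_syll_list)
--     offsets = []
--     total = 0
--     for s in sent_syll_list:
--         offsets.append(total)
--         total += len(s)
--     offsets.append(total)
--
--     pos_list = []
--     for i in range(sent_len - nf_len):
--         if big[offsets[i]:offsets[i + nf_len]] == target:
--             pos_list.extend([i + j, 1] for j in range(nf_len))
--     return pos_list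
-- ===== Notes on version B (the rewrite author's own statement) =====
-- stated objective: alternative
-- what changed: B concatenates the sentence once and precomputes syllable boundary offsets, so each window test is a single slice comparison of the big string instead of re-building the window by list-slice + join; the emitted positions come from extend over a generator instead of an inner append loop.
import Mathlib
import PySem

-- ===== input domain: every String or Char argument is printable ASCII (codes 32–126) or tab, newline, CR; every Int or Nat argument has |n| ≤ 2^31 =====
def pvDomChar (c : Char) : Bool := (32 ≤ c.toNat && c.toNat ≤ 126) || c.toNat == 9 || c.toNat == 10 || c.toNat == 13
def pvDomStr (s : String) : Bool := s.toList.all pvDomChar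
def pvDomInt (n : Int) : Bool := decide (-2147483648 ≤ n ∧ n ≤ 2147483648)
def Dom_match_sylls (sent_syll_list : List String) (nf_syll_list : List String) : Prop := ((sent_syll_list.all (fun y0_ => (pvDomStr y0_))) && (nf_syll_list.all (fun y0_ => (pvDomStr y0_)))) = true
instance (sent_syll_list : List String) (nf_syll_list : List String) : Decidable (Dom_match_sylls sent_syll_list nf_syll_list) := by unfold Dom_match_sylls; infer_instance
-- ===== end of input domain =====

-- B concatenates the sentence once and compares precomputed boundary-offset slices,
-- instead of re-joining each syllable window (objective: alternative decomposition;
-- return value proved identical).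

-- ===== PORT A =====
def match_sylls (sent_syll_list : List String) (nf_syll_list : List String) : List (List Int) :=
  let nf_len : Int := (nf_syll_list.length : Int)
  let sent_len : Int := (sent_syll_list.length : Int)
  let nf_sylls : String := PySem.Str.join "" nf_syll_list
  (PySem.List.pyRange 0 (sent_len - nf_len) 1).foldl (fun pos_list i =>
    let sent_sylls : String :=
      PySem.Str.join "" (PySem.List.slice sent_syll_list (some i) (some (i + nf_len)))
    if sent_sylls = nf_sylls then
      (PySem.List.pyRange 0 nf_len 1).foldl (fun pl j => pl ++ [[i + j, 1]]) pos_list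
    else pos_list) []

-- ===== PORT B =====
def match_sylls_alt (sent_syll_list : List String) (nf_syll_list : List String) : List (List Int) :=
  let nf_len : Int := (nf_syll_list.length : Int)
  let sent_len : Int := (sent_syll_list.length : Int)
  let target : String := PySem.Str.join "" nf_syll_list
  let big : String := PySem.Str.join "" sent_syll_list
  let p := sent_syll_list.foldl
    (fun (acc : List Int × Int) s => (acc.1 ++ [acc.2], acc.2 + PySem.Str.len s)) ([], 0)
  let offsets : List Int := p.1 ++ [p.2]
  (PySem.List.pyRange 0 (sent_len - nf_len) 1).foldl (fun pos_list i =>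
    if PySem.Str.slice big (some (PySem.List.pyGetD offsets i 0))
        (some (PySem.List.pyGetD offsets (i + nf_len) 0)) = target then
      pos_list ++ (PySem.List.pyRange 0 nf_len 1).map (fun j => [i + j, 1])
    else pos_list) []

-- ===== PRECONDITION & SPEC =====
def Spec_match_sylls (sent_syll_list : List String) (nf_syll_list : List String) (out : List (List Int)) : Prop := out = match_sylls_alt sent_syll_list nf_syll_list
instance (sent_syll_list : List String) (nf_syll_list : List String) (out : List (List Int)) : Decidable (Spec_match_sylls sent_syll_list nf_syll_list out) := by unfold Spec_match_sylls; infer_instance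

-- ===== CLAIM (what is proved, stated in full; the proofs are below) =====
def Claim_equal_match_sylls : Prop := ∀ (sent_syll_list : List String) (nf_syll_list : List String), Dom_match_sylls sent_syll_list nf_syll_list → Spec_match_sylls sent_syll_list nf_syll_list (match_sylls sent_syll_list nf_syll_list)

-- ===== LEMMAS AND PROOFS =====

/-- Sum of the lengths of the first `k` pieces: the character offset of piece `k`. -/
def psum (L : List (List Char)) (k : Nat) : Nat := ((L.take k).map List.length).sum

theorem psum_zero (L : List (List Char)) : psum L 0 = 0 := rfl

theorem psum_nil (k : Nat) : psum [] k = 0 := by simp [psum]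

theorem psum_cons (c : List Char) (L : List (List Char)) (k : Nat) :
    psum (c :: L) (k + 1) = c.length + psum L k := by simp [psum]

theorem join_nil_eq_flatten (L : List (List Char)) :
    PySem.Chars.join [] L = L.flatten := by
  induction L with
  | nil => rfl
  | cons c L ih => cases L <;> simp_all [PySem.Chars.join, List.intercalate]

theorem toList_join_empty (parts : List String) :
    (PySem.Str.join "" parts).toList = (parts.map String.toList).flatten := by
  rw [PySem.Str.toList_join]; exact join_nil_eq_flatten _

/-- The window `[psum a, psum (a+m))` of the flattening is the flattening of the window. -/
theorem flatten_window (L : List (List Char)) (a m : Nat) :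
    (L.flatten.drop (psum L a)).take (psum L (a + m) - psum L a)
      = ((L.drop a).take m).flatten := by
  induction a generalizing L with
  | zero =>
    simp only [psum_zero, List.drop_zero, Nat.sub_zero, Nat.zero_add]
    induction m generalizing L with
    | zero => simp [psum_zero]
    | succ m ih =>
      cases L with
      | nil => simp [psum_nil]
      | cons c L =>
        simp only [psum_cons, List.flatten_cons, List.take_append, List.take_succ_cons]
        rw [List.take_of_length_le (by omega), Nat.add_sub_cancel_left, ih]
  | succ a ih =>
    cases L with
    | nil => simp [psum_nil]
    | cons c L =>
      have hsm : a + 1 + m = (a + m) + 1 := by omega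
      simp only [hsm, psum_cons, List.flatten_cons, List.drop_append, List.drop_succ_cons]
      rw [List.drop_eq_nil_of_le (by omega), Nat.add_sub_add_left, List.nil_append,
        Nat.add_sub_cancel_left]
      exact ih L

/-- Characterisation of B's offset-building fold. -/
theorem off_build (sent : List String) (xs : List Int) (t : Int) :
    sent.foldl (fun (acc : List Int × Int) s => (acc.1 ++ [acc.2], acc.2 + PySem.Str.len s)) (xs, t)
      = (xs ++ (List.range sent.length).map
            (fun k => t + (psum (sent.map String.toList) k : Int)),
         t + (psum (sent.map String.toList) sent.length : Int)) := by
  induction sent generalizing xs t with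
  | nil => simp [psum_nil]
  | cons s sent ih =>
    have hfun : ∀ k : Nat, ((psum (s.toList :: List.map String.toList sent) (k + 1) : Nat) : Int)
        = PySem.Str.len s + ((psum (List.map String.toList sent) k : Nat) : Int) := by
      intro k; simp only [psum_cons, PySem.Str.len_eq]; push_cast; ring
    simp only [List.foldl_cons, ih, List.length_cons, List.map_cons, List.range_succ_eq_map,
      List.map_map, Prod.mk.injEq, List.append_assoc, psum_zero, Nat.cast_zero, add_zero]
    refine ⟨?_, by rw [hfun]; ring⟩
    congr 1
    simp only [List.singleton_append]
    congr 1
    apply List.map_congr_left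
    intro k _
    simp only [Function.comp_apply, Nat.succ_eq_add_one, hfun]
    ring

/-- Reading an in-range entry of B's offsets list gives the prefix-length sum. -/
theorem off_get (sent : List String) (k : Nat) (hk : k ≤ sent.length) :
    PySem.List.pyGetD
      ((sent.foldl (fun (acc : List Int × Int) s => (acc.1 ++ [acc.2], acc.2 + PySem.Str.len s)) ([], 0)).1
        ++ [(sent.foldl (fun (acc : List Int × Int) s => (acc.1 ++ [acc.2], acc.2 + PySem.Str.len s)) ([], 0)).2])
      (k : Int) 0
      = (psum (sent.map String.toList) k : Int) := by
  rw [off_build, PySem.List.pyGetD_natCast]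
  simp only [List.nil_append, zero_add]
  rcases Nat.lt_or_ge k sent.length with h | h
  · rw [List.getD_append _ _ _ _ (by simpa using h),
      List.getD_eq_getElem _ _ (by simpa using h)]
    simp
  · have hk' : k = sent.length := le_antisymm hk h
    subst hk'
    rw [List.getD_append_right _ _ _ _ (by simp)]
    simp

/-- The two window conditions compare equal strings. -/
theorem slice_eq_join (sent : List String) (a m : Nat) :
    PySem.Str.slice (PySem.Str.join "" sent)
        (some ((psum (sent.map String.toList) a : Nat) : Int))
        (some ((psum (sent.map String.toList) (a + m) : Nat) : Int))
      = PySem.Str.join ""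
          (PySem.List.slice sent (some ((a : Nat) : Int)) (some (((a : Nat) : Int) + (m : Nat)))) := by
  rw [← String.toList_inj]
  rw [PySem.Str.toList_slice, PySem.Chars.slice_eq_listSlice, toList_join_empty,
    toList_join_empty]
  have him : ((a : Int) + ((m : Nat) : Int)) = ((a + m : Nat) : Int) := by push_cast; ring
  rw [him, PySem.List.slice_natCast, PySem.List.slice_natCast]
  rw [Nat.add_sub_cancel_left, List.map_take, List.map_drop]
  exact flatten_window (sent.map String.toList) a m

-- ===== VERDICT (by name: the statement is the Claim_ definition above) =====
theorem match_sylls_spec : Claim_equal_match_sylls := by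
  intro sent nf _
  unfold Spec_match_sylls match_sylls match_sylls_alt
  apply Eq.symm
  apply PySem.List.foldl_congr_mem
  intro acc i hi
  rw [PySem.List.mem_pyRange_one] at hi
  obtain ⟨h0, hlt⟩ := hi
  -- name the common index values
  obtain ⟨a, rfl⟩ : ∃ a : Nat, i = (a : Int) := ⟨i.toNat, (Int.toNat_of_nonneg h0).symm⟩
  have ham : a + nf.length ≤ sent.length := by omega
  have him : ((a : Int) + (nf.length : Int)) = ((a + nf.length : Nat) : Int) := by
    push_cast; ring
  rw [him, off_get sent a (by omega), off_get sent (a + nf.length) ham, ← him,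
    slice_eq_join sent a nf.length]
  by_cases h :
      PySem.Str.join ""
        (PySem.List.slice sent (some ((a : Nat) : Int)) (some (((a : Nat) : Int) + (nf.length : Nat))))
      = PySem.Str.join "" nf
  · rw [if_pos h, if_pos h, PySem.List.foldl_append_singleton_eq_map]
  · rw [if_neg h, if_neg h]
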